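-- pv_equiv track=rewrite | github.com/MadhuSuniL/pubg_chess | game/extra.py | kar_blinks
-- ===== SOURCE A (Python) =====
-- def id_to_num(id):
--     return int(id.replace('#c',''))
--
-- def kar_blinks(id):
--     blinks = {'up':[],
--               'down':[],
--               'left':[],
--               'right':[],
--               }
--     cell = id_to_num(id)
--
--     cell_var = cell
--     # for up cells
--     while cell_var > 10:
--         cell_var -= 10
--         blinks['up'].append(cell_var)
--
--     cell_var = cell
--     # for down cells
--     while cell_var < 91:
--         cell_var += 10
--         blinks['down'].append(cell_var)
--
--     cell_var = cell
--     # for left cells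
--     while True:
--         cell_var -= 1
--         if cell_var%10 == 0:
--             break
--         blinks['left'].append(cell_var)
--
--     cell_var = cell
--     # for right cells
--     while True:
--         if cell_var%10 == 0:
--             break
--         cell_var += 1
--         blinks['right'].append(cell_var)
--
--     for key in blinks:
--         try:
--             blinks[key].remove(cell)
--         except:
--             pass
--
--
--
--     return blinks
-- ===== SOURCE B (Python) =====
-- def id_to_num(id):
--     return int(id.replace('#c',''))
--
-- def kar_blinks(id):
--     cell = id_to_num(id)
--     col = (cell - 1) % 10 + 1
--     return {'up': list(range(cell - 10, 0, -10)),
--             'down': list(range(cell + 10, 101, 10)),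
--             'left': list(range(cell - 1, cell - col, -1)),
--             'right': list(range(cell + 1, cell + 11 - col, 1)),
--             }
-- ===== Notes on version B (the rewrite author's own statement) =====
-- stated objective: simpler
-- what changed: B replaces A's four while-loops plus the remove(cell) pass (which always raises and is caught, a no-op) by computing the column once with modular arithmetic and building each direction directly as a range().
import Mathlib
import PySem

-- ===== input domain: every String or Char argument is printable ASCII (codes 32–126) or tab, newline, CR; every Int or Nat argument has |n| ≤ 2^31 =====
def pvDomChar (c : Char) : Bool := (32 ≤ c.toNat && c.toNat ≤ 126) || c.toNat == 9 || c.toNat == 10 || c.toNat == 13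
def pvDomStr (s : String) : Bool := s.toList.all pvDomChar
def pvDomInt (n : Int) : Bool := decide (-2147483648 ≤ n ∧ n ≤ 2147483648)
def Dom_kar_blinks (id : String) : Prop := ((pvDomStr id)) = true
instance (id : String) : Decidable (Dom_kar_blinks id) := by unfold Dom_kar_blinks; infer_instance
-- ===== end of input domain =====

-- B replaces A's four while-loops (and the always-failing remove(cell) pass) by one column
-- computation and four direct range() constructions; objective: simpler, no speed claim.

-- ===== PORT A =====
-- int(id.replace('#c',''))
def id_to_num? (id : String) : Option Int :=
  PySem.Int.ofStr? (PySem.Str.replace id "#c" "")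

-- The four while-loops, as structural recursion on a fuel that bounds the iteration count
-- (up/down advance by 10 toward the 10/91 threshold; left/right run at most 9 steps, mod 10).
-- while cell_var > 10: cell_var -= 10; blinks['up'].append(cell_var)
def upLoopA (fuel : Nat) (c : Int) : List Int :=
  match fuel with
  | 0 => []
  | fuel + 1 => if 10 < c then (c - 10) :: upLoopA fuel (c - 10) else []

-- while cell_var < 91: cell_var += 10; blinks['down'].append(cell_var)
def downLoopA (fuel : Nat) (c : Int) : List Int :=
  match fuel with
  | 0 => []
  | fuel + 1 => if c < 91 then (c + 10) :: downLoopA fuel (c + 10) else []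

-- while True: cell_var -= 1; if cell_var%10 == 0: break; blinks['left'].append(cell_var)
def leftLoopA (fuel : Nat) (c : Int) : List Int :=
  match fuel with
  | 0 => []
  | fuel + 1 => if PySem.Int.mod (c - 1) 10 = 0 then [] else (c - 1) :: leftLoopA fuel (c - 1)

-- while True: if cell_var%10 == 0: break; cell_var += 1; blinks['right'].append(cell_var)
def rightLoopA (fuel : Nat) (c : Int) : List Int :=
  match fuel with
  | 0 => []
  | fuel + 1 => if PySem.Int.mod c 10 = 0 then [] else (c + 1) :: rightLoopA fuel (c + 1)

-- try: l.remove(cell) except: pass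
def tryRemove (l : List Int) (x : Int) : List Int :=
  (PySem.List.remove? l x).getD l

def kar_blinks (id : String) : List (String × List Int) :=
  match id_to_num? id with
  | none => []   -- int() raises ValueError here; excluded by Pre_
  | some cell =>
    [("up", tryRemove (upLoopA (cell - 10).toNat cell) cell),
     ("down", tryRemove (downLoopA (91 - cell).toNat cell) cell),
     ("left", tryRemove (leftLoopA 10 cell) cell),
     ("right", tryRemove (rightLoopA 10 cell) cell)]

-- ===== PORT B =====
def kar_blinks_alt (id : String) : List (String × List Int) :=
  match PySem.Int.ofStr? (PySem.Str.replace id "#c" "") with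
  | none => []   -- int() raises ValueError here; excluded by Pre_
  | some cell =>
    let col := PySem.Int.mod (cell - 1) 10 + 1
    [("up", PySem.List.pyRange (cell - 10) 0 (-10)),
     ("down", PySem.List.pyRange (cell + 10) 101 10),
     ("left", PySem.List.pyRange (cell - 1) (cell - col) (-1)),
     ("right", PySem.List.pyRange (cell + 1) (cell + 11 - col) 1)]

-- ===== PRECONDITION & SPEC =====
-- Pre_ excludes exactly the ids whose '#c'-stripped form is not a valid int literal: there
-- int(...) raises ValueError in A.
def Pre_kar_blinks (id : String) : Prop :=
  (PySem.Int.ofStr? (PySem.Str.replace id "#c" "")).isSome = true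
instance (id : String) : Decidable (Pre_kar_blinks id) := by unfold Pre_kar_blinks; infer_instance
def pvWitness_kar_blinks : String := "#c25"

def Spec_kar_blinks (id : String) (out : List (String × List Int)) : Prop := out = kar_blinks_alt id
instance (id : String) (out : List (String × List Int)) : Decidable (Spec_kar_blinks id out) := by unfold Spec_kar_blinks; infer_instance

-- ===== CLAIM (what is proved, stated in full; the proofs are below) =====
def Claim_equal_kar_blinks : Prop := ∀ (id : String), Dom_kar_blinks id → Pre_kar_blinks id → Spec_kar_blinks id (kar_blinks id)

-- ===== LEMMAS AND PROOFS =====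

-- step through pyRange with a negative step (specific cons/nil shape the loop proofs need)
theorem pyRange_neg_cons (a b s : Int) (hs : s < 0) (h : b < a) :
    PySem.List.pyRange a b s = a :: PySem.List.pyRange (a + s) b s := by
  simp only [PySem.List.pyRange, if_neg (by omega : ¬ s = 0), if_neg (by omega : ¬ (0:Int) < s)]
  rw [if_pos h]
  by_cases h2 : b < a + s
  · rw [if_pos h2]
    have hcount : ((a - b + -s - 1) / -s).toNat = ((a + s - b + -s - 1) / -s).toNat + 1 := by
      have e1 : a - b + -s - 1 = (a + s - b + -s - 1) + 1 * -s := by ring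
      have hnn : 0 ≤ (a + s - b + -s - 1) / -s := Int.ediv_nonneg (by omega) (by omega)
      rw [e1, Int.add_mul_ediv_right _ _ (by omega : -s ≠ 0)]
      omega
    rw [hcount, List.range_succ_eq_map]
    simp only [List.map_cons, List.map_map]
    congr 1
    · simp
    · apply List.map_congr_left; intro k _; simp [Function.comp]; ring
  · rw [if_neg h2]
    have hcount : ((a - b + -s - 1) / -s).toNat = 1 := by
      have hge : 1 ≤ (a - b + -s - 1) / -s := (Int.le_ediv_iff_mul_le (by omega)).mpr (by omega)
      have hlt : (a - b + -s - 1) / -s < 2 := (Int.ediv_lt_iff_lt_mul (by omega)).mpr (by omega)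
      have hd : (a - b + -s - 1) / -s = 1 := by omega
      omega
    rw [hcount]
    simp

theorem pyRange_neg_nil (a b s : Int) (hs : s < 0) (h : a ≤ b) :
    PySem.List.pyRange a b s = [] := by
  simp only [PySem.List.pyRange, if_neg (by omega : ¬ s = 0), if_neg (by omega : ¬ (0:Int) < s),
    if_neg (by omega : ¬ b < a)]
  simp

theorem pyRange_pos_cons (a b s : Int) (hs : 0 < s) (h : a < b) :
    PySem.List.pyRange a b s = a :: PySem.List.pyRange (a + s) b s := by
  simp only [PySem.List.pyRange, if_neg (by omega : ¬ s = 0), if_pos hs, if_pos h]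
  by_cases h2 : a + s < b
  · rw [if_pos h2]
    have hcount : ((b - a + s - 1) / s).toNat = ((b - (a + s) + s - 1) / s).toNat + 1 := by
      have e1 : b - a + s - 1 = (b - (a + s) + s - 1) + 1 * s := by ring
      have hnn : 0 ≤ (b - (a + s) + s - 1) / s := Int.ediv_nonneg (by omega) (by omega)
      rw [e1, Int.add_mul_ediv_right _ _ (by omega : s ≠ 0)]
      omega
    rw [hcount, List.range_succ_eq_map]
    simp only [List.map_cons, List.map_map]
    congr 1
    · simp
    · apply List.map_congr_left; intro k _; simp [Function.comp]; ring
  · rw [if_neg h2]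
    have hcount : ((b - a + s - 1) / s).toNat = 1 := by
      have hge : 1 ≤ (b - a + s - 1) / s := (Int.le_ediv_iff_mul_le (by omega)).mpr (by omega)
      have hlt : (b - a + s - 1) / s < 2 := (Int.ediv_lt_iff_lt_mul (by omega)).mpr (by omega)
      have hd : (b - a + s - 1) / s = 1 := by omega
      omega
    rw [hcount]
    simp

theorem pyRange_pos_nil (a b s : Int) (hs : 0 < s) (h : b ≤ a) :
    PySem.List.pyRange a b s = [] := by
  simp only [PySem.List.pyRange, if_neg (by omega : ¬ s = 0), if_pos hs,
    if_neg (by omega : ¬ a < b)]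
  simp

theorem upLoopA_eq (fuel : Nat) (c : Int) (hf : c ≤ 10 + 10 * (fuel : Int)) :
    upLoopA fuel c = PySem.List.pyRange (c - 10) 0 (-10) := by
  induction fuel generalizing c with
  | zero =>
    rw [upLoopA, pyRange_neg_nil (c - 10) 0 (-10) (by norm_num) (by push_cast at hf; omega)]
  | succ fuel ih =>
    rw [upLoopA]
    by_cases h : 10 < c
    · rw [if_pos h, ih (c - 10) (by push_cast at hf ⊢; omega),
        pyRange_neg_cons (c - 10) 0 (-10) (by norm_num) (by omega)]
      ring_nf
    · rw [if_neg h, pyRange_neg_nil (c - 10) 0 (-10) (by norm_num) (by omega)]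

theorem downLoopA_eq (fuel : Nat) (c : Int) (hf : 91 ≤ c + 10 * (fuel : Int)) :
    downLoopA fuel c = PySem.List.pyRange (c + 10) 101 10 := by
  induction fuel generalizing c with
  | zero =>
    rw [downLoopA, pyRange_pos_nil (c + 10) 101 10 (by norm_num) (by push_cast at hf; omega)]
  | succ fuel ih =>
    rw [downLoopA]
    by_cases h : c < 91
    · rw [if_pos h, ih (c + 10) (by push_cast at hf ⊢; omega),
        pyRange_pos_cons (c + 10) 101 10 (by norm_num) (by omega)]
    · rw [if_neg h, pyRange_pos_nil (c + 10) 101 10 (by norm_num) (by omega)]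

theorem leftLoopA_eq (fuel : Nat) (c : Int) (hf : (c - 1) % 10 < (fuel : Int)) :
    leftLoopA fuel c = PySem.List.pyRange (c - 1) (c - (PySem.Int.mod (c - 1) 10 + 1)) (-1) := by
  induction fuel generalizing c with
  | zero =>
    exact absurd hf (by have := Int.emod_nonneg (c - 1) (by norm_num : (10:Int) ≠ 0); push_cast; omega)
  | succ fuel ih =>
    rw [leftLoopA]
    simp only [PySem.Int.mod_eq_emod_of_pos (by norm_num : (0:Int) < 10)]
    have h1 : 0 ≤ (c - 1) % 10 := Int.emod_nonneg _ (by norm_num)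
    have h2 : (c - 1) % 10 < 10 := Int.emod_lt_of_pos _ (by norm_num)
    by_cases h : (c - 1) % 10 = 0
    · rw [if_pos h, h]
      exact (pyRange_neg_nil (c - 1) (c - (0 + 1)) (-1) (by norm_num) (by omega)).symm
    · have hstep : (c - 1 - 1) % 10 = (c - 1) % 10 - 1 := by omega
      rw [if_neg h, ih (c - 1) (by push_cast at hf ⊢; omega)]
      simp only [PySem.Int.mod_eq_emod_of_pos (by norm_num : (0:Int) < 10)]
      rw [pyRange_neg_cons (c - 1) (c - ((c - 1) % 10 + 1)) (-1) (by norm_num) (by omega), hstep]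
      have e1 : c - 1 - 1 = c - 1 + -1 := by ring
      have e2 : c - 1 - ((c - 1) % 10 - 1 + 1) = c - ((c - 1) % 10 + 1) := by ring
      rw [e1, e2]

theorem rightLoopA_eq (fuel : Nat) (c : Int) (hf : (10 - c % 10) % 10 < (fuel : Int)) :
    rightLoopA fuel c = PySem.List.pyRange (c + 1) (c + 11 - (PySem.Int.mod (c - 1) 10 + 1)) 1 := by
  induction fuel generalizing c with
  | zero =>
    exact absurd hf (by have := Int.emod_nonneg (10 - c % 10) (by norm_num : (10:Int) ≠ 0); push_cast; omega)
  | succ fuel ih =>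
    rw [rightLoopA]
    simp only [PySem.Int.mod_eq_emod_of_pos (by norm_num : (0:Int) < 10)]
    have h1 : 0 ≤ c % 10 := Int.emod_nonneg _ (by norm_num)
    have h2 : c % 10 < 10 := Int.emod_lt_of_pos _ (by norm_num)
    by_cases h : c % 10 = 0
    · rw [if_pos h]
      have hm : (c - 1) % 10 = 9 := by omega
      rw [hm]
      exact (PySem.List.pyRange_one_eq_nil (by omega)).symm
    · have hnext : (c + 1 - 1) % 10 = c % 10 := by ring_nf
      have hstep2 : (c - 1) % 10 = c % 10 - 1 := by omega
      rw [if_neg h, ih (c + 1) (by push_cast at hf ⊢; omega)]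
      simp only [PySem.Int.mod_eq_emod_of_pos (by norm_num : (0:Int) < 10)]
      rw [hnext, hstep2,
        PySem.List.pyRange_one_cons (a := c + 1) (b := c + 11 - (c % 10 - 1 + 1)) (by omega)]
      have eb : c + 1 + 11 - (c % 10 + 1) = c + 11 - (c % 10 - 1 + 1) := by ring
      rw [eb]

-- the remove(cell) pass is a no-op: cell never appears in any of the four lists
theorem mem_upLoopA_lt {x : Int} (fuel : Nat) {c : Int} (hx : x ∈ upLoopA fuel c) : x < c := by
  induction fuel generalizing c with
  | zero => rw [upLoopA] at hx; simp at hx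
  | succ fuel ih =>
    rw [upLoopA] at hx
    by_cases h : 10 < c
    · rw [if_pos h, List.mem_cons] at hx
      rcases hx with h' | h'
      · omega
      · exact lt_trans (ih h') (by omega)
    · rw [if_neg h] at hx; simp at hx

theorem mem_downLoopA_gt {x : Int} (fuel : Nat) {c : Int} (hx : x ∈ downLoopA fuel c) : c < x := by
  induction fuel generalizing c with
  | zero => rw [downLoopA] at hx; simp at hx
  | succ fuel ih =>
    rw [downLoopA] at hx
    by_cases h : c < 91
    · rw [if_pos h, List.mem_cons] at hx
      rcases hx with h' | h'
      · omega
      · exact lt_trans (by omega) (ih h')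
    · rw [if_neg h] at hx; simp at hx

theorem mem_leftLoopA_lt {x : Int} (fuel : Nat) {c : Int} (hx : x ∈ leftLoopA fuel c) : x < c := by
  induction fuel generalizing c with
  | zero => rw [leftLoopA] at hx; simp at hx
  | succ fuel ih =>
    rw [leftLoopA] at hx
    by_cases h : PySem.Int.mod (c - 1) 10 = 0
    · rw [if_pos h] at hx; simp at hx
    · rw [if_neg h, List.mem_cons] at hx
      rcases hx with h' | h'
      · omega
      · exact lt_trans (ih h') (by omega)

theorem mem_rightLoopA_gt {x : Int} (fuel : Nat) {c : Int} (hx : x ∈ rightLoopA fuel c) : c < x := by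
  induction fuel generalizing c with
  | zero => rw [rightLoopA] at hx; simp at hx
  | succ fuel ih =>
    rw [rightLoopA] at hx
    by_cases h : PySem.Int.mod c 10 = 0
    · rw [if_pos h] at hx; simp at hx
    · rw [if_neg h, List.mem_cons] at hx
      rcases hx with h' | h'
      · omega
      · exact lt_trans (by omega) (ih h')

theorem tryRemove_not_mem {l : List Int} {x : Int} (h : x ∉ l) : tryRemove l x = l := by
  unfold tryRemove
  rw [(PySem.List.remove?_eq_none_iff l x).mpr h]
  rfl

-- ===== VERDICT (by name: the statement is the Claim_ definition above) =====
theorem kar_blinks_spec : Claim_equal_kar_blinks := by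
  intro id _ hpre
  unfold Spec_kar_blinks kar_blinks kar_blinks_alt id_to_num?
  cases h : PySem.Int.ofStr? (PySem.Str.replace id "#c" "") with
  | none => simp [Pre_kar_blinks, h] at hpre
  | some cell =>
    simp only []
    rw [tryRemove_not_mem (fun hm => absurd (mem_upLoopA_lt _ hm) (by omega)),
        tryRemove_not_mem (fun hm => absurd (mem_downLoopA_gt _ hm) (by omega)),
        tryRemove_not_mem (fun hm => absurd (mem_leftLoopA_lt _ hm) (by omega)),
        tryRemove_not_mem (fun hm => absurd (mem_rightLoopA_gt _ hm) (by omega)),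
        upLoopA_eq _ _ (by omega), downLoopA_eq _ _ (by omega),
        leftLoopA_eq _ _ (by omega), rightLoopA_eq _ _ (by omega)]
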